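-- pv_equiv track=rewrite | github.com/dinnerparty718/leetpy | _meta/Balanced Split.py | balancedSplitExists
-- ===== SOURCE A (Python) =====
-- def balancedSplitExists(arr):
--     # Write your code here
--
--     if not arr:
--         return False
--
--     arr.sort()
--     n = len(arr)
--
--     left, right = 1, n-1
--
--     while left <= right:
--         mid = left + (right-left) // 2
--
--         left_sum = sum(arr[:mid])
--         right_sum = sum(arr[mid:])
--
--         if left_sum == right_sum:
--             return True if arr[mid-1] < arr[mid] else False
--         elif left_sum < right_sum:
--             left = mid + 1
--         else:
--             right = mid - 1
--
--     return False
-- ===== SOURCE B (Python) =====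
-- def balancedSplitExists(arr):
--     # Prefix-sum table + recursive binary search (A re-sums both slices on
--     # every iteration of an imperative while loop).
--     s = sorted(arr)
--     n = len(s)
--     pref = [0]
--     for x in s:
--         pref.append(pref[-1] + x)
--     total = pref[n]
--
--     def search(lo, hi):
--         if lo > hi:
--             return False
--         mid = (lo + hi) // 2
--         d = 2 * pref[mid] - total
--         if d == 0:
--             return s[mid - 1] < s[mid]
--         if d < 0:
--             return search(mid + 1, hi)
--         return search(lo, mid - 1)
--
--     return n > 0 and search(1, n - 1)
-- ===== Notes on version B (the rewrite author's own statement) =====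
-- stated objective: alternative
-- what changed: A's imperative while-loop binary search recomputes sum(arr[:mid]) and sum(arr[mid:]) on every iteration; B builds a prefix-sum table once and runs a recursive binary search comparing 2*pref[mid] against the total, so the per-step O(n) slice summation disappears.
import Mathlib
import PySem

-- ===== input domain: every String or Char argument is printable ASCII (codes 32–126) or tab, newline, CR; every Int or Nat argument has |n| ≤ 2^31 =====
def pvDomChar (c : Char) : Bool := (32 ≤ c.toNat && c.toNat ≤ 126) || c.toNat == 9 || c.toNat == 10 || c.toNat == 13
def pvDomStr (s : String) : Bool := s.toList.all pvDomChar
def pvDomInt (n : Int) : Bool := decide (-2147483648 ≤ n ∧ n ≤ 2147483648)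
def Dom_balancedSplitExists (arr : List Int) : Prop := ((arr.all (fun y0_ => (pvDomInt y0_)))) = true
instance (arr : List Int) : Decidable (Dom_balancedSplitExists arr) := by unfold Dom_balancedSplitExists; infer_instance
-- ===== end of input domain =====

-- B replaces A's while-loop binary search that re-sums both slices each step by a
-- recursive binary search over a prefix-sum table built once (objective: alternative).
-- A sorts its argument in place (a caller-visible mutation); B does not — the
-- equivalence proved here is about the return value only.

-- ===== PORT A =====
-- while left <= right: mid = left + (right-left)//2; compare sum(arr[:mid]) with sum(arr[mid:]).
-- arr[mid-1], arr[mid] are always in range on reachable states (1 ≤ mid ≤ n-1), so pyGetD is exact.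
def pvGoA (s : List Int) (left right : Int) : Bool :=
  if _h : left ≤ right then
    let mid := left + PySem.Int.floordiv (right - left) 2
    let left_sum := (PySem.List.slice s none (some mid)).sum
    let right_sum := (PySem.List.slice s (some mid) none).sum
    if left_sum = right_sum then
      decide (PySem.List.pyGetD s (mid - 1) 0 < PySem.List.pyGetD s mid 0)
    else if left_sum < right_sum then
      pvGoA s (mid + 1) right
    else
      pvGoA s left (mid - 1)
  else false
termination_by (right - left + 1).toNat
decreasing_by
  all_goals
    simp only [PySem.Int.floordiv_eq_ediv_of_pos (by norm_num : (0:Int) < 2)] at *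
  all_goals omega

def balancedSplitExists (arr : List Int) : Bool :=
  if arr = [] then false
  else
    let s := PySem.List.sorted arr (fun x => x) false
    let n : Int := s.length
    pvGoA s 1 (n - 1)

-- ===== PORT B =====
def pvSearchB (s pref : List Int) (total lo hi : Int) : Bool :=
  if _h : lo > hi then false
  else
    let mid := PySem.Int.floordiv (lo + hi) 2
    let d := 2 * PySem.List.pyGetD pref mid 0 - total
    if d = 0 then
      decide (PySem.List.pyGetD s (mid - 1) 0 < PySem.List.pyGetD s mid 0)
    else if d < 0 then
      pvSearchB s pref total (mid + 1) hi
    else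
      pvSearchB s pref total lo (mid - 1)
termination_by (hi - lo + 1).toNat
decreasing_by
  all_goals
    simp only [PySem.Int.floordiv_eq_ediv_of_pos (by norm_num : (0:Int) < 2)] at *
  all_goals omega

def balancedSplitExists_alt (arr : List Int) : Bool :=
  let s := PySem.List.sorted arr (fun x => x) false
  let n : Int := s.length
  -- pref = [0]; for x in s: pref.append(pref[-1] + x)
  let pref := s.foldl (fun acc x => acc ++ [PySem.List.pyGetD acc (-1) 0 + x]) [0]
  let total := PySem.List.pyGetD pref n 0
  decide (n > 0) && pvSearchB s pref total 1 (n - 1)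

-- ===== PRECONDITION & SPEC =====
def Spec_balancedSplitExists (arr : List Int) (out : Bool) : Prop := out = balancedSplitExists_alt arr
instance (arr : List Int) (out : Bool) : Decidable (Spec_balancedSplitExists arr out) := by unfold Spec_balancedSplitExists; infer_instance

-- ===== CLAIM (what is proved, stated in full; the proofs are below) =====
def Claim_equal_balancedSplitExists : Prop := ∀ (arr : List Int), Dom_balancedSplitExists arr → Spec_balancedSplitExists arr (balancedSplitExists arr)

-- ===== LEMMAS AND PROOFS =====

-- Partial sums starting from a running accumulator c: the list [c+x1, c+x1+x2, …].
def pvPartial (c : Int) : List Int → List Int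
  | [] => []
  | x :: xs => (c + x) :: pvPartial (c + x) xs

theorem pvPartial_length (c : Int) (s : List Int) : (pvPartial c s).length = s.length := by
  induction s generalizing c with
  | nil => rfl
  | cons x xs ih => simp [pvPartial, ih]

theorem pvPartial_getElem (s : List Int) (c : Int) (j : Nat) (hj : j < s.length) :
    (pvPartial c s)[j]'(by rw [pvPartial_length]; exact hj) = c + (s.take (j + 1)).sum := by
  induction s generalizing c j with
  | nil => simp at hj
  | cons x xs ih =>
    cases j with
    | zero => simp [pvPartial]
    | succ k =>
      simp only [pvPartial, List.getElem_cons_succ, List.take_succ_cons, List.sum_cons]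
      rw [ih (c + x) k (by simpa using hj)]
      ring

-- The foldl in B builds exactly acc ++ pvPartial (last acc) s.
theorem pvFold_eq (s : List Int) : ∀ (acc : List Int) (h : acc ≠ []),
    s.foldl (fun acc x => acc ++ [PySem.List.pyGetD acc (-1) 0 + x]) acc
      = acc ++ pvPartial (acc.getLast h) s := by
  induction s with
  | nil => intro acc h; simp [pvPartial]
  | cons x xs ih =>
    intro acc h
    simp only [List.foldl_cons]
    rw [ih (acc ++ [PySem.List.pyGetD acc (-1) 0 + x]) (by simp)]
    have hlast : PySem.List.pyGetD acc (-1) 0 = acc.getLast h :=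
      PySem.List.pyGetD_neg_one (h := h) (d := 0)
    simp [pvPartial, hlast, List.getLast_concat, List.getLast_append]

-- pref[i] = sum of the first i elements, for 0 ≤ i ≤ n.
theorem pvPref_get (s : List Int) (i : Int) (h0 : 0 ≤ i) (hn : i ≤ s.length) :
    PySem.List.pyGetD (s.foldl (fun acc x => acc ++ [PySem.List.pyGetD acc (-1) 0 + x]) [0]) i 0
      = (s.take i.toNat).sum := by
  rw [pvFold_eq s [0] (by simp)]
  simp only [List.getLast_singleton]
  obtain ⟨k, rfl⟩ : ∃ k : Nat, i = (k : Int) := ⟨i.toNat, by omega⟩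
  rw [PySem.List.pyGetD_natCast]
  cases k with
  | zero => simp
  | succ j =>
    have hj : j < s.length := by exact_mod_cast (by push_cast at hn ⊢; omega : (j : Int) < s.length)
    have hlen : j + 1 < ([(0:Int)] ++ pvPartial 0 s).length := by
      simp [pvPartial_length]; omega
    rw [List.getD_eq_getElem _ _ hlen]
    have : ([(0:Int)] ++ pvPartial 0 s)[j + 1]'hlen = (pvPartial 0 s)[j]'(by simp [pvPartial_length]; omega) := by
      simp
    rw [this, pvPartial_getElem s 0 j hj]
    simp

theorem pvSum_split (s : List Int) (k : Nat) : (s.take k).sum + (s.drop k).sum = s.sum := by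
  rw [← List.sum_append, List.take_append_drop]

-- Core: the two searches agree whenever 1 ≤ lo and hi ≤ n - 1.
theorem pvSearch_agree (s : List Int)
    (pref : List Int) (hpref : pref = s.foldl (fun acc x => acc ++ [PySem.List.pyGetD acc (-1) 0 + x]) [0])
    (total : Int) (htotal : total = s.sum) :
    ∀ (lo hi : Int), 1 ≤ lo → hi ≤ (s.length : Int) - 1 →
      pvGoA s lo hi = pvSearchB s pref total lo hi := by
  intro lo hi
  induction lo, hi using pvGoA.induct s with
  | case1 lo hi hle mid ls rs heq =>
    intro h1 h2
    rw [pvGoA, pvSearchB]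
    have hmid : PySem.Int.floordiv (lo + hi) 2 = mid := by
      simp only [mid, PySem.Int.floordiv_eq_ediv_of_pos (by norm_num : (0:Int) < 2)]
      omega
    have hmb : 1 ≤ mid ∧ mid ≤ (s.length : Int) - 1 := by
      constructor <;>
        simp only [mid, PySem.Int.floordiv_eq_ediv_of_pos (by norm_num : (0:Int) < 2)] <;> omega
    have hls : PySem.List.pyGetD pref mid 0 = ls := by
      rw [hpref, pvPref_get s mid (by omega) (by omega)]
      have hmn : (some mid) = some ((mid.toNat : Nat) : Int) := by congr 1; omega
      simp only [ls, hmn, PySem.List.slice_to_natCast]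
    have hrs : ls + rs = s.sum := by
      have hmn : (some mid) = some ((mid.toNat : Nat) : Int) := by congr 1; omega
      simp only [ls, rs, hmn, PySem.List.slice_to_natCast, PySem.List.slice_from_natCast]
      exact pvSum_split s mid.toNat
    have hd : 2 * PySem.List.pyGetD pref mid 0 - total = ls - rs := by
      rw [hls, htotal, ← hrs]; ring
    rw [dif_pos hle, dif_neg (by omega : ¬ lo > hi)]
    simp only [hmid, hd]
    rw [if_pos heq, if_pos (by omega : ls - rs = 0)]
  | case2 lo hi hle mid ls rs hne hlt ih =>
    intro h1 h2
    rw [pvGoA, pvSearchB]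
    have hmid : PySem.Int.floordiv (lo + hi) 2 = mid := by
      simp only [mid, PySem.Int.floordiv_eq_ediv_of_pos (by norm_num : (0:Int) < 2)]
      omega
    have hmb : 1 ≤ mid ∧ mid ≤ (s.length : Int) - 1 := by
      constructor <;>
        simp only [mid, PySem.Int.floordiv_eq_ediv_of_pos (by norm_num : (0:Int) < 2)] <;> omega
    have hls : PySem.List.pyGetD pref mid 0 = ls := by
      rw [hpref, pvPref_get s mid (by omega) (by omega)]
      have hmn : (some mid) = some ((mid.toNat : Nat) : Int) := by congr 1; omega
      simp only [ls, hmn, PySem.List.slice_to_natCast]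
    have hrs : ls + rs = s.sum := by
      have hmn : (some mid) = some ((mid.toNat : Nat) : Int) := by congr 1; omega
      simp only [ls, rs, hmn, PySem.List.slice_to_natCast, PySem.List.slice_from_natCast]
      exact pvSum_split s mid.toNat
    have hd : 2 * PySem.List.pyGetD pref mid 0 - total = ls - rs := by
      rw [hls, htotal, ← hrs]; ring
    rw [dif_pos hle, dif_neg (by omega : ¬ lo > hi)]
    simp only [hmid, hd]
    rw [if_neg hne, if_pos hlt,
        if_neg (by omega : ¬ ls - rs = 0), if_pos (by omega : ls - rs < 0)]
    exact ih (by omega) h2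
  | case3 lo hi hle mid ls rs hne hnlt ih =>
    intro h1 h2
    rw [pvGoA, pvSearchB]
    have hmid : PySem.Int.floordiv (lo + hi) 2 = mid := by
      simp only [mid, PySem.Int.floordiv_eq_ediv_of_pos (by norm_num : (0:Int) < 2)]
      omega
    have hmb : 1 ≤ mid ∧ mid ≤ (s.length : Int) - 1 := by
      constructor <;>
        simp only [mid, PySem.Int.floordiv_eq_ediv_of_pos (by norm_num : (0:Int) < 2)] <;> omega
    have hls : PySem.List.pyGetD pref mid 0 = ls := by
      rw [hpref, pvPref_get s mid (by omega) (by omega)]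
      have hmn : (some mid) = some ((mid.toNat : Nat) : Int) := by congr 1; omega
      simp only [ls, hmn, PySem.List.slice_to_natCast]
    have hrs : ls + rs = s.sum := by
      have hmn : (some mid) = some ((mid.toNat : Nat) : Int) := by congr 1; omega
      simp only [ls, rs, hmn, PySem.List.slice_to_natCast, PySem.List.slice_from_natCast]
      exact pvSum_split s mid.toNat
    have hd : 2 * PySem.List.pyGetD pref mid 0 - total = ls - rs := by
      rw [hls, htotal, ← hrs]; ring
    rw [dif_pos hle, dif_neg (by omega : ¬ lo > hi)]
    simp only [hmid, hd]
    rw [if_neg hne, if_neg hnlt,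
        if_neg (by omega : ¬ ls - rs = 0), if_neg (by omega : ¬ ls - rs < 0)]
    exact ih h1 (by omega)
  | case4 lo hi hgt =>
    intro _ _
    rw [pvGoA, pvSearchB]
    rw [dif_neg hgt, dif_pos (by omega : lo > hi)]

-- ===== VERDICT (by name: the statement is the Claim_ definition above) =====
theorem balancedSplitExists_spec : Claim_equal_balancedSplitExists := by
  intro arr _
  unfold Spec_balancedSplitExists balancedSplitExists balancedSplitExists_alt
  by_cases h : arr = []
  · subst h; simp [pvSearchB, PySem.List.sorted]
  · rw [if_neg h]
    simp only []
    set s := PySem.List.sorted arr (fun x => x) false with hs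
    have hn : s ≠ [] := by
      intro hc
      have hp := PySem.List.sorted_perm (xs := arr) (key := fun x => x) (rev := false)
      rw [← hs, hc] at hp
      exact h hp.symm.eq_nil
    have hlen : 0 < s.length := List.length_pos_of_ne_nil hn
    have htotal : PySem.List.pyGetD
        (s.foldl (fun acc x => acc ++ [PySem.List.pyGetD acc (-1) 0 + x]) [0]) (s.length : Int) 0
        = s.sum := by
      rw [pvPref_get s (s.length : Int) (by omega) (by omega)]
      simp
    rw [pvSearch_agree s _ rfl _ htotal 1 ((s.length : Int) - 1) (le_refl 1) (by omega)]
    have hd : decide (((s.length : Int)) > 0) = true := by simp; omega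
    rw [hd, Bool.true_and]
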